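-- pv_equiv track=rewrite | github.com/JetIAbot/PUG | core/data_processor.py | _procesar_materias
-- ===== SOURCE A (Python) =====
-- from typing import Dict, List, Optional, Any
--
-- def _procesar_materias(materias_raw: List[dict]) -> List[dict]:
--     """
--     Procesar materias del portal al formato interno
--
--     Args:
--         materias_raw: Lista de materias del portal
--
--     Returns:
--         List[dict]: Materias en formato interno
--     """
--     materias_procesadas = []
--
--     for materia in materias_raw:
--         materia_procesada = {
--             'nombre': materia.get('name', materia.get('nombre', '')),
--             'codigo': materia.get('code', materia.get('codigo', '')),
--             'creditos': materia.get('credits', materia.get('creditos', '')),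
--             'estado': materia.get('status', materia.get('estado', '')),
--             'semestre': materia.get('semester', materia.get('semestre', '')),
--             'ano': materia.get('year', materia.get('ano', ''))
--         }
--         materias_procesadas.append(materia_procesada)
--
--     return materias_procesadas
-- ===== SOURCE B (Python) =====
-- KEY_INDEX = {
--     'name': ('nombre', 1),   'nombre': ('nombre', 0),
--     'code': ('codigo', 1),   'codigo': ('codigo', 0),
--     'credits': ('creditos', 1), 'creditos': ('creditos', 0),
--     'status': ('estado', 1), 'estado': ('estado', 0),
--     'semester': ('semestre', 1), 'semestre': ('semestre', 0),
--     'year': ('ano', 1),      'ano': ('ano', 0),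
-- }
--
-- SLOTS = ['nombre', 'codigo', 'creditos', 'estado', 'semestre', 'ano']
--
--
-- def _procesar_una(materia):
--     # single scan over the materia's own keys, classifying each into a slot;
--     # an english key (priority 1) beats a spanish one (priority 0)
--     best = {}
--     for k, v in materia.items():
--         hit = KEY_INDEX.get(k)
--         if hit is None:
--             continue
--         slot, pri = hit
--         if slot not in best or pri > best[slot][0]:
--             best[slot] = (pri, v)
--     return {s: (best[s][1] if s in best else '') for s in SLOTS}
--
--
-- def _procesar_materias(materias_raw):
--     return [_procesar_una(m) for m in materias_raw]
-- ===== Notes on version B (the rewrite author's own statement) =====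
-- stated objective: alternative
-- what changed: Instead of six get-with-fallback lookups per materia, B scans each materia's own items once, classifying every key via a reverse KEY_INDEX table into a slot with an english-over-spanish priority, then emits the six slots in fixed order.
import Mathlib
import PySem

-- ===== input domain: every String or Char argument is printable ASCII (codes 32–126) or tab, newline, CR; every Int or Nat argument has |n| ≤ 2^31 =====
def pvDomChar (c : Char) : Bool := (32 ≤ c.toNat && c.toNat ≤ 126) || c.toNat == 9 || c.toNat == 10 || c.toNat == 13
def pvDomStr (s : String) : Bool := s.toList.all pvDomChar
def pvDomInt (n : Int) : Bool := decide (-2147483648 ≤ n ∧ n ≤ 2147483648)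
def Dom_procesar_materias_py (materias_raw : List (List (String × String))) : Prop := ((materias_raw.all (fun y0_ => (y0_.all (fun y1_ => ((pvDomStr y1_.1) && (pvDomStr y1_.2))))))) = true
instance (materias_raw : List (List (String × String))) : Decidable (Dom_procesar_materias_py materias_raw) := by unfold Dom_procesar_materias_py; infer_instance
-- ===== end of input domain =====

-- B scans each materia's own keys once through a reverse KEY_INDEX table instead of doing six get-with-fallback lookups (objective: alternative).

-- ===== PORT A =====
-- A: loop appending a six-key dict literal per materia, each value = materia.get(en_key, materia.get(es_key, '')).
def procesar_materias_py (materias_raw : List (List (String × String))) : List (List (String × String)) :=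
  materias_raw.foldl (fun acc materia =>
    let d := PySem.Dict.mk materia
    acc ++ [[("nombre", d.getD "name" (d.getD "nombre" "")),
             ("codigo", d.getD "code" (d.getD "codigo" "")),
             ("creditos", d.getD "credits" (d.getD "creditos" "")),
             ("estado", d.getD "status" (d.getD "estado" "")),
             ("semestre", d.getD "semester" (d.getD "semestre" "")),
             ("ano", d.getD "year" (d.getD "ano" ""))]]) []

-- ===== PORT B =====
-- B: reverse index key -> (slot, priority); one scan over the materia's items, english (1) beats spanish (0).
def pvKeyIndex : PySem.Dict String (String × Int) :=
  PySem.Dict.mk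
    [("name", ("nombre", 1)), ("nombre", ("nombre", 0)),
     ("code", ("codigo", 1)), ("codigo", ("codigo", 0)),
     ("credits", ("creditos", 1)), ("creditos", ("creditos", 0)),
     ("status", ("estado", 1)), ("estado", ("estado", 0)),
     ("semester", ("semestre", 1)), ("semestre", ("semestre", 0)),
     ("year", ("ano", 1)), ("ano", ("ano", 0))]

def pvSlots : List String := ["nombre", "codigo", "creditos", "estado", "semestre", "ano"]

def pvStep (best : PySem.Dict String (Int × String)) (kv : String × String) :
    PySem.Dict String (Int × String) :=
  match pvKeyIndex.get? kv.1 with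
  | none => best
  | some (slot, pri) =>
    if !best.contains slot || pri > (best.getD slot (0, "")).1
    then best.insert slot (pri, kv.2) else best

def pvProcesarUna (materia : List (String × String)) : List (String × String) :=
  let best := materia.foldl pvStep PySem.Dict.empty
  pvSlots.map (fun s => (s, match best.get? s with | some pv => pv.2 | none => ""))

def procesar_materias_py_alt (materias_raw : List (List (String × String))) : List (List (String × String)) :=
  materias_raw.map pvProcesarUna

-- ===== PRECONDITION & SPEC =====
def Spec_procesar_materias_py (materias_raw : List (List (String × String))) (out : List (List (String × String))) : Prop := out = procesar_materias_py_alt materias_raw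
instance (materias_raw : List (List (String × String))) (out : List (List (String × String))) : Decidable (Spec_procesar_materias_py materias_raw out) := by unfold Spec_procesar_materias_py; infer_instance

-- ===== CLAIM (what is proved, stated in full; the proofs are below) =====
def Claim_equal_procesar_materias_py : Prop := ∀ (materias_raw : List (List (String × String))), Dom_procesar_materias_py materias_raw → Spec_procesar_materias_py materias_raw (procesar_materias_py materias_raw)

-- ===== LEMMAS AND PROOFS =====

-- Classification of pvKeyIndex lookups, one lemma per slot.
theorem pv_hcls_nombre : ∀ (k : String) (p : Int), pvKeyIndex.get? k = some ("nombre", p) → (k = "name" ∧ p = 1) ∨ (k = "nombre" ∧ p = 0) := by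
  intro k p h
  unfold pvKeyIndex at h
  rw [PySem.Dict.get?_mk_cons] at h
  by_cases e1 : ("name" == k) = true
  · rw [if_pos e1] at h
    simp only [Option.some.injEq, Prod.mk.injEq] at h
    exact Or.inl ⟨(beq_iff_eq.mp e1).symm, h.2.symm⟩
  · rw [if_neg e1] at h
    rw [PySem.Dict.get?_mk_cons] at h
    by_cases e2 : ("nombre" == k) = true
    · rw [if_pos e2] at h
      simp only [Option.some.injEq, Prod.mk.injEq] at h
      exact Or.inr ⟨(beq_iff_eq.mp e2).symm, h.2.symm⟩
    · rw [if_neg e2] at h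
      rw [PySem.Dict.get?_mk_cons] at h
      by_cases e3 : ("code" == k) = true
      · rw [if_pos e3] at h
        simp only [Option.some.injEq, Prod.mk.injEq] at h
        exact absurd h.1 (by decide)
      · rw [if_neg e3] at h
        rw [PySem.Dict.get?_mk_cons] at h
        by_cases e4 : ("codigo" == k) = true
        · rw [if_pos e4] at h
          simp only [Option.some.injEq, Prod.mk.injEq] at h
          exact absurd h.1 (by decide)
        · rw [if_neg e4] at h
          rw [PySem.Dict.get?_mk_cons] at h
          by_cases e5 : ("credits" == k) = true
          · rw [if_pos e5] at h
            simp only [Option.some.injEq, Prod.mk.injEq] at h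
            exact absurd h.1 (by decide)
          · rw [if_neg e5] at h
            rw [PySem.Dict.get?_mk_cons] at h
            by_cases e6 : ("creditos" == k) = true
            · rw [if_pos e6] at h
              simp only [Option.some.injEq, Prod.mk.injEq] at h
              exact absurd h.1 (by decide)
            · rw [if_neg e6] at h
              rw [PySem.Dict.get?_mk_cons] at h
              by_cases e7 : ("status" == k) = true
              · rw [if_pos e7] at h
                simp only [Option.some.injEq, Prod.mk.injEq] at h
                exact absurd h.1 (by decide)
              · rw [if_neg e7] at h
                rw [PySem.Dict.get?_mk_cons] at h
                by_cases e8 : ("estado" == k) = true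
                · rw [if_pos e8] at h
                  simp only [Option.some.injEq, Prod.mk.injEq] at h
                  exact absurd h.1 (by decide)
                · rw [if_neg e8] at h
                  rw [PySem.Dict.get?_mk_cons] at h
                  by_cases e9 : ("semester" == k) = true
                  · rw [if_pos e9] at h
                    simp only [Option.some.injEq, Prod.mk.injEq] at h
                    exact absurd h.1 (by decide)
                  · rw [if_neg e9] at h
                    rw [PySem.Dict.get?_mk_cons] at h
                    by_cases e10 : ("semestre" == k) = true
                    · rw [if_pos e10] at h
                      simp only [Option.some.injEq, Prod.mk.injEq] at h
                      exact absurd h.1 (by decide)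
                    · rw [if_neg e10] at h
                      rw [PySem.Dict.get?_mk_cons] at h
                      by_cases e11 : ("year" == k) = true
                      · rw [if_pos e11] at h
                        simp only [Option.some.injEq, Prod.mk.injEq] at h
                        exact absurd h.1 (by decide)
                      · rw [if_neg e11] at h
                        rw [PySem.Dict.get?_mk_cons] at h
                        by_cases e12 : ("ano" == k) = true
                        · rw [if_pos e12] at h
                          simp only [Option.some.injEq, Prod.mk.injEq] at h
                          exact absurd h.1 (by decide)
                        · rw [if_neg e12] at h
                          simp [PySem.Dict.get?] at h

theorem pv_hcls_codigo : ∀ (k : String) (p : Int), pvKeyIndex.get? k = some ("codigo", p) → (k = "code" ∧ p = 1) ∨ (k = "codigo" ∧ p = 0) := by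
  intro k p h
  unfold pvKeyIndex at h
  rw [PySem.Dict.get?_mk_cons] at h
  by_cases e1 : ("name" == k) = true
  · rw [if_pos e1] at h
    simp only [Option.some.injEq, Prod.mk.injEq] at h
    exact absurd h.1 (by decide)
  · rw [if_neg e1] at h
    rw [PySem.Dict.get?_mk_cons] at h
    by_cases e2 : ("nombre" == k) = true
    · rw [if_pos e2] at h
      simp only [Option.some.injEq, Prod.mk.injEq] at h
      exact absurd h.1 (by decide)
    · rw [if_neg e2] at h
      rw [PySem.Dict.get?_mk_cons] at h
      by_cases e3 : ("code" == k) = true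
      · rw [if_pos e3] at h
        simp only [Option.some.injEq, Prod.mk.injEq] at h
        exact Or.inl ⟨(beq_iff_eq.mp e3).symm, h.2.symm⟩
      · rw [if_neg e3] at h
        rw [PySem.Dict.get?_mk_cons] at h
        by_cases e4 : ("codigo" == k) = true
        · rw [if_pos e4] at h
          simp only [Option.some.injEq, Prod.mk.injEq] at h
          exact Or.inr ⟨(beq_iff_eq.mp e4).symm, h.2.symm⟩
        · rw [if_neg e4] at h
          rw [PySem.Dict.get?_mk_cons] at h
          by_cases e5 : ("credits" == k) = true
          · rw [if_pos e5] at h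
            simp only [Option.some.injEq, Prod.mk.injEq] at h
            exact absurd h.1 (by decide)
          · rw [if_neg e5] at h
            rw [PySem.Dict.get?_mk_cons] at h
            by_cases e6 : ("creditos" == k) = true
            · rw [if_pos e6] at h
              simp only [Option.some.injEq, Prod.mk.injEq] at h
              exact absurd h.1 (by decide)
            · rw [if_neg e6] at h
              rw [PySem.Dict.get?_mk_cons] at h
              by_cases e7 : ("status" == k) = true
              · rw [if_pos e7] at h
                simp only [Option.some.injEq, Prod.mk.injEq] at h
                exact absurd h.1 (by decide)
              · rw [if_neg e7] at h
                rw [PySem.Dict.get?_mk_cons] at h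
                by_cases e8 : ("estado" == k) = true
                · rw [if_pos e8] at h
                  simp only [Option.some.injEq, Prod.mk.injEq] at h
                  exact absurd h.1 (by decide)
                · rw [if_neg e8] at h
                  rw [PySem.Dict.get?_mk_cons] at h
                  by_cases e9 : ("semester" == k) = true
                  · rw [if_pos e9] at h
                    simp only [Option.some.injEq, Prod.mk.injEq] at h
                    exact absurd h.1 (by decide)
                  · rw [if_neg e9] at h
                    rw [PySem.Dict.get?_mk_cons] at h
                    by_cases e10 : ("semestre" == k) = true
                    · rw [if_pos e10] at h
                      simp only [Option.some.injEq, Prod.mk.injEq] at h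
                      exact absurd h.1 (by decide)
                    · rw [if_neg e10] at h
                      rw [PySem.Dict.get?_mk_cons] at h
                      by_cases e11 : ("year" == k) = true
                      · rw [if_pos e11] at h
                        simp only [Option.some.injEq, Prod.mk.injEq] at h
                        exact absurd h.1 (by decide)
                      · rw [if_neg e11] at h
                        rw [PySem.Dict.get?_mk_cons] at h
                        by_cases e12 : ("ano" == k) = true
                        · rw [if_pos e12] at h
                          simp only [Option.some.injEq, Prod.mk.injEq] at h
                          exact absurd h.1 (by decide)
                        · rw [if_neg e12] at h
                          simp [PySem.Dict.get?] at h

theorem pv_hcls_creditos : ∀ (k : String) (p : Int), pvKeyIndex.get? k = some ("creditos", p) → (k = "credits" ∧ p = 1) ∨ (k = "creditos" ∧ p = 0) := by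
  intro k p h
  unfold pvKeyIndex at h
  rw [PySem.Dict.get?_mk_cons] at h
  by_cases e1 : ("name" == k) = true
  · rw [if_pos e1] at h
    simp only [Option.some.injEq, Prod.mk.injEq] at h
    exact absurd h.1 (by decide)
  · rw [if_neg e1] at h
    rw [PySem.Dict.get?_mk_cons] at h
    by_cases e2 : ("nombre" == k) = true
    · rw [if_pos e2] at h
      simp only [Option.some.injEq, Prod.mk.injEq] at h
      exact absurd h.1 (by decide)
    · rw [if_neg e2] at h
      rw [PySem.Dict.get?_mk_cons] at h
      by_cases e3 : ("code" == k) = true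
      · rw [if_pos e3] at h
        simp only [Option.some.injEq, Prod.mk.injEq] at h
        exact absurd h.1 (by decide)
      · rw [if_neg e3] at h
        rw [PySem.Dict.get?_mk_cons] at h
        by_cases e4 : ("codigo" == k) = true
        · rw [if_pos e4] at h
          simp only [Option.some.injEq, Prod.mk.injEq] at h
          exact absurd h.1 (by decide)
        · rw [if_neg e4] at h
          rw [PySem.Dict.get?_mk_cons] at h
          by_cases e5 : ("credits" == k) = true
          · rw [if_pos e5] at h
            simp only [Option.some.injEq, Prod.mk.injEq] at h
            exact Or.inl ⟨(beq_iff_eq.mp e5).symm, h.2.symm⟩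
          · rw [if_neg e5] at h
            rw [PySem.Dict.get?_mk_cons] at h
            by_cases e6 : ("creditos" == k) = true
            · rw [if_pos e6] at h
              simp only [Option.some.injEq, Prod.mk.injEq] at h
              exact Or.inr ⟨(beq_iff_eq.mp e6).symm, h.2.symm⟩
            · rw [if_neg e6] at h
              rw [PySem.Dict.get?_mk_cons] at h
              by_cases e7 : ("status" == k) = true
              · rw [if_pos e7] at h
                simp only [Option.some.injEq, Prod.mk.injEq] at h
                exact absurd h.1 (by decide)
              · rw [if_neg e7] at h
                rw [PySem.Dict.get?_mk_cons] at h
                by_cases e8 : ("estado" == k) = true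
                · rw [if_pos e8] at h
                  simp only [Option.some.injEq, Prod.mk.injEq] at h
                  exact absurd h.1 (by decide)
                · rw [if_neg e8] at h
                  rw [PySem.Dict.get?_mk_cons] at h
                  by_cases e9 : ("semester" == k) = true
                  · rw [if_pos e9] at h
                    simp only [Option.some.injEq, Prod.mk.injEq] at h
                    exact absurd h.1 (by decide)
                  · rw [if_neg e9] at h
                    rw [PySem.Dict.get?_mk_cons] at h
                    by_cases e10 : ("semestre" == k) = true
                    · rw [if_pos e10] at h
                      simp only [Option.some.injEq, Prod.mk.injEq] at h
                      exact absurd h.1 (by decide)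
                    · rw [if_neg e10] at h
                      rw [PySem.Dict.get?_mk_cons] at h
                      by_cases e11 : ("year" == k) = true
                      · rw [if_pos e11] at h
                        simp only [Option.some.injEq, Prod.mk.injEq] at h
                        exact absurd h.1 (by decide)
                      · rw [if_neg e11] at h
                        rw [PySem.Dict.get?_mk_cons] at h
                        by_cases e12 : ("ano" == k) = true
                        · rw [if_pos e12] at h
                          simp only [Option.some.injEq, Prod.mk.injEq] at h
                          exact absurd h.1 (by decide)
                        · rw [if_neg e12] at h
                          simp [PySem.Dict.get?] at h

theorem pv_hcls_estado : ∀ (k : String) (p : Int), pvKeyIndex.get? k = some ("estado", p) → (k = "status" ∧ p = 1) ∨ (k = "estado" ∧ p = 0) := by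
  intro k p h
  unfold pvKeyIndex at h
  rw [PySem.Dict.get?_mk_cons] at h
  by_cases e1 : ("name" == k) = true
  · rw [if_pos e1] at h
    simp only [Option.some.injEq, Prod.mk.injEq] at h
    exact absurd h.1 (by decide)
  · rw [if_neg e1] at h
    rw [PySem.Dict.get?_mk_cons] at h
    by_cases e2 : ("nombre" == k) = true
    · rw [if_pos e2] at h
      simp only [Option.some.injEq, Prod.mk.injEq] at h
      exact absurd h.1 (by decide)
    · rw [if_neg e2] at h
      rw [PySem.Dict.get?_mk_cons] at h
      by_cases e3 : ("code" == k) = true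
      · rw [if_pos e3] at h
        simp only [Option.some.injEq, Prod.mk.injEq] at h
        exact absurd h.1 (by decide)
      · rw [if_neg e3] at h
        rw [PySem.Dict.get?_mk_cons] at h
        by_cases e4 : ("codigo" == k) = true
        · rw [if_pos e4] at h
          simp only [Option.some.injEq, Prod.mk.injEq] at h
          exact absurd h.1 (by decide)
        · rw [if_neg e4] at h
          rw [PySem.Dict.get?_mk_cons] at h
          by_cases e5 : ("credits" == k) = true
          · rw [if_pos e5] at h
            simp only [Option.some.injEq, Prod.mk.injEq] at h
            exact absurd h.1 (by decide)
          · rw [if_neg e5] at h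
            rw [PySem.Dict.get?_mk_cons] at h
            by_cases e6 : ("creditos" == k) = true
            · rw [if_pos e6] at h
              simp only [Option.some.injEq, Prod.mk.injEq] at h
              exact absurd h.1 (by decide)
            · rw [if_neg e6] at h
              rw [PySem.Dict.get?_mk_cons] at h
              by_cases e7 : ("status" == k) = true
              · rw [if_pos e7] at h
                simp only [Option.some.injEq, Prod.mk.injEq] at h
                exact Or.inl ⟨(beq_iff_eq.mp e7).symm, h.2.symm⟩
              · rw [if_neg e7] at h
                rw [PySem.Dict.get?_mk_cons] at h
                by_cases e8 : ("estado" == k) = true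
                · rw [if_pos e8] at h
                  simp only [Option.some.injEq, Prod.mk.injEq] at h
                  exact Or.inr ⟨(beq_iff_eq.mp e8).symm, h.2.symm⟩
                · rw [if_neg e8] at h
                  rw [PySem.Dict.get?_mk_cons] at h
                  by_cases e9 : ("semester" == k) = true
                  · rw [if_pos e9] at h
                    simp only [Option.some.injEq, Prod.mk.injEq] at h
                    exact absurd h.1 (by decide)
                  · rw [if_neg e9] at h
                    rw [PySem.Dict.get?_mk_cons] at h
                    by_cases e10 : ("semestre" == k) = true
                    · rw [if_pos e10] at h
                      simp only [Option.some.injEq, Prod.mk.injEq] at h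
                      exact absurd h.1 (by decide)
                    · rw [if_neg e10] at h
                      rw [PySem.Dict.get?_mk_cons] at h
                      by_cases e11 : ("year" == k) = true
                      · rw [if_pos e11] at h
                        simp only [Option.some.injEq, Prod.mk.injEq] at h
                        exact absurd h.1 (by decide)
                      · rw [if_neg e11] at h
                        rw [PySem.Dict.get?_mk_cons] at h
                        by_cases e12 : ("ano" == k) = true
                        · rw [if_pos e12] at h
                          simp only [Option.some.injEq, Prod.mk.injEq] at h
                          exact absurd h.1 (by decide)
                        · rw [if_neg e12] at h
                          simp [PySem.Dict.get?] at h

theorem pv_hcls_semestre : ∀ (k : String) (p : Int), pvKeyIndex.get? k = some ("semestre", p) → (k = "semester" ∧ p = 1) ∨ (k = "semestre" ∧ p = 0) := by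
  intro k p h
  unfold pvKeyIndex at h
  rw [PySem.Dict.get?_mk_cons] at h
  by_cases e1 : ("name" == k) = true
  · rw [if_pos e1] at h
    simp only [Option.some.injEq, Prod.mk.injEq] at h
    exact absurd h.1 (by decide)
  · rw [if_neg e1] at h
    rw [PySem.Dict.get?_mk_cons] at h
    by_cases e2 : ("nombre" == k) = true
    · rw [if_pos e2] at h
      simp only [Option.some.injEq, Prod.mk.injEq] at h
      exact absurd h.1 (by decide)
    · rw [if_neg e2] at h
      rw [PySem.Dict.get?_mk_cons] at h
      by_cases e3 : ("code" == k) = true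
      · rw [if_pos e3] at h
        simp only [Option.some.injEq, Prod.mk.injEq] at h
        exact absurd h.1 (by decide)
      · rw [if_neg e3] at h
        rw [PySem.Dict.get?_mk_cons] at h
        by_cases e4 : ("codigo" == k) = true
        · rw [if_pos e4] at h
          simp only [Option.some.injEq, Prod.mk.injEq] at h
          exact absurd h.1 (by decide)
        · rw [if_neg e4] at h
          rw [PySem.Dict.get?_mk_cons] at h
          by_cases e5 : ("credits" == k) = true
          · rw [if_pos e5] at h
            simp only [Option.some.injEq, Prod.mk.injEq] at h
            exact absurd h.1 (by decide)
          · rw [if_neg e5] at h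
            rw [PySem.Dict.get?_mk_cons] at h
            by_cases e6 : ("creditos" == k) = true
            · rw [if_pos e6] at h
              simp only [Option.some.injEq, Prod.mk.injEq] at h
              exact absurd h.1 (by decide)
            · rw [if_neg e6] at h
              rw [PySem.Dict.get?_mk_cons] at h
              by_cases e7 : ("status" == k) = true
              · rw [if_pos e7] at h
                simp only [Option.some.injEq, Prod.mk.injEq] at h
                exact absurd h.1 (by decide)
              · rw [if_neg e7] at h
                rw [PySem.Dict.get?_mk_cons] at h
                by_cases e8 : ("estado" == k) = true
                · rw [if_pos e8] at h
                  simp only [Option.some.injEq, Prod.mk.injEq] at h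
                  exact absurd h.1 (by decide)
                · rw [if_neg e8] at h
                  rw [PySem.Dict.get?_mk_cons] at h
                  by_cases e9 : ("semester" == k) = true
                  · rw [if_pos e9] at h
                    simp only [Option.some.injEq, Prod.mk.injEq] at h
                    exact Or.inl ⟨(beq_iff_eq.mp e9).symm, h.2.symm⟩
                  · rw [if_neg e9] at h
                    rw [PySem.Dict.get?_mk_cons] at h
                    by_cases e10 : ("semestre" == k) = true
                    · rw [if_pos e10] at h
                      simp only [Option.some.injEq, Prod.mk.injEq] at h
                      exact Or.inr ⟨(beq_iff_eq.mp e10).symm, h.2.symm⟩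
                    · rw [if_neg e10] at h
                      rw [PySem.Dict.get?_mk_cons] at h
                      by_cases e11 : ("year" == k) = true
                      · rw [if_pos e11] at h
                        simp only [Option.some.injEq, Prod.mk.injEq] at h
                        exact absurd h.1 (by decide)
                      · rw [if_neg e11] at h
                        rw [PySem.Dict.get?_mk_cons] at h
                        by_cases e12 : ("ano" == k) = true
                        · rw [if_pos e12] at h
                          simp only [Option.some.injEq, Prod.mk.injEq] at h
                          exact absurd h.1 (by decide)
                        · rw [if_neg e12] at h
                          simp [PySem.Dict.get?] at h

theorem pv_hcls_ano : ∀ (k : String) (p : Int), pvKeyIndex.get? k = some ("ano", p) → (k = "year" ∧ p = 1) ∨ (k = "ano" ∧ p = 0) := by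
  intro k p h
  unfold pvKeyIndex at h
  rw [PySem.Dict.get?_mk_cons] at h
  by_cases e1 : ("name" == k) = true
  · rw [if_pos e1] at h
    simp only [Option.some.injEq, Prod.mk.injEq] at h
    exact absurd h.1 (by decide)
  · rw [if_neg e1] at h
    rw [PySem.Dict.get?_mk_cons] at h
    by_cases e2 : ("nombre" == k) = true
    · rw [if_pos e2] at h
      simp only [Option.some.injEq, Prod.mk.injEq] at h
      exact absurd h.1 (by decide)
    · rw [if_neg e2] at h
      rw [PySem.Dict.get?_mk_cons] at h
      by_cases e3 : ("code" == k) = true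
      · rw [if_pos e3] at h
        simp only [Option.some.injEq, Prod.mk.injEq] at h
        exact absurd h.1 (by decide)
      · rw [if_neg e3] at h
        rw [PySem.Dict.get?_mk_cons] at h
        by_cases e4 : ("codigo" == k) = true
        · rw [if_pos e4] at h
          simp only [Option.some.injEq, Prod.mk.injEq] at h
          exact absurd h.1 (by decide)
        · rw [if_neg e4] at h
          rw [PySem.Dict.get?_mk_cons] at h
          by_cases e5 : ("credits" == k) = true
          · rw [if_pos e5] at h
            simp only [Option.some.injEq, Prod.mk.injEq] at h
            exact absurd h.1 (by decide)
          · rw [if_neg e5] at h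
            rw [PySem.Dict.get?_mk_cons] at h
            by_cases e6 : ("creditos" == k) = true
            · rw [if_pos e6] at h
              simp only [Option.some.injEq, Prod.mk.injEq] at h
              exact absurd h.1 (by decide)
            · rw [if_neg e6] at h
              rw [PySem.Dict.get?_mk_cons] at h
              by_cases e7 : ("status" == k) = true
              · rw [if_pos e7] at h
                simp only [Option.some.injEq, Prod.mk.injEq] at h
                exact absurd h.1 (by decide)
              · rw [if_neg e7] at h
                rw [PySem.Dict.get?_mk_cons] at h
                by_cases e8 : ("estado" == k) = true
                · rw [if_pos e8] at h
                  simp only [Option.some.injEq, Prod.mk.injEq] at h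
                  exact absurd h.1 (by decide)
                · rw [if_neg e8] at h
                  rw [PySem.Dict.get?_mk_cons] at h
                  by_cases e9 : ("semester" == k) = true
                  · rw [if_pos e9] at h
                    simp only [Option.some.injEq, Prod.mk.injEq] at h
                    exact absurd h.1 (by decide)
                  · rw [if_neg e9] at h
                    rw [PySem.Dict.get?_mk_cons] at h
                    by_cases e10 : ("semestre" == k) = true
                    · rw [if_pos e10] at h
                      simp only [Option.some.injEq, Prod.mk.injEq] at h
                      exact absurd h.1 (by decide)
                    · rw [if_neg e10] at h
                      rw [PySem.Dict.get?_mk_cons] at h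
                      by_cases e11 : ("year" == k) = true
                      · rw [if_pos e11] at h
                        simp only [Option.some.injEq, Prod.mk.injEq] at h
                        exact Or.inl ⟨(beq_iff_eq.mp e11).symm, h.2.symm⟩
                      · rw [if_neg e11] at h
                        rw [PySem.Dict.get?_mk_cons] at h
                        by_cases e12 : ("ano" == k) = true
                        · rw [if_pos e12] at h
                          simp only [Option.some.injEq, Prod.mk.injEq] at h
                          exact Or.inr ⟨(beq_iff_eq.mp e12).symm, h.2.symm⟩
                        · rw [if_neg e12] at h
                          simp [PySem.Dict.get?] at h


-- What B's scan leaves at slot s, for a slot whose only keys are en (priority 1) and es (priority 0).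
theorem pv_fold_get? (s en es : String) (hne : en ≠ es)
    (hen : pvKeyIndex.get? en = some (s, 1)) (hes : pvKeyIndex.get? es = some (s, 0))
    (hcls : ∀ k p, pvKeyIndex.get? k = some (s, p) → (k = en ∧ p = 1) ∨ (k = es ∧ p = 0))
    (materia : List (String × String)) (best : PySem.Dict String (Int × String))
    (hinv : ∀ p w, best.get? s = some (p, w) → p = 0 ∨ p = 1) :
    (materia.foldl pvStep best).get? s =
      match (PySem.Dict.mk materia).get? en, best.get? s with
      | some v, none => some (1, v)
      | some v, some (p, w) => if 1 > p then some (1, v) else some (p, w)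
      | none, some pw => some pw
      | none, none => ((PySem.Dict.mk materia).get? es).map (fun v => ((0 : Int), v)) := by
  induction materia generalizing best with
  | nil =>
    simp only [List.foldl]
    have h0 : (PySem.Dict.mk ([] : List (String × String))).get? en = none := by
      simp [PySem.Dict.get?]
    have h1 : (PySem.Dict.mk ([] : List (String × String))).get? es = none := by
      simp [PySem.Dict.get?]
    rw [h0, h1]
    cases hb : best.get? s <;> simp
  | cons kv rest ih =>
    simp only [List.foldl]
    have hmk_en : (PySem.Dict.mk (kv :: rest)).get? en =
        if kv.1 == en then some kv.2 else (PySem.Dict.mk rest).get? en := by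
      cases kv; exact PySem.Dict.get?_mk_cons _ _ _ _
    have hmk_es : (PySem.Dict.mk (kv :: rest)).get? es =
        if kv.1 == es then some kv.2 else (PySem.Dict.mk rest).get? es := by
      cases kv; exact PySem.Dict.get?_mk_cons _ _ _ _
    cases hk : pvKeyIndex.get? kv.1 with
    | none =>
      have hken : kv.1 ≠ en := fun h => by rw [h, hen] at hk; cases hk
      have hkes : kv.1 ≠ es := fun h => by rw [h, hes] at hk; cases hk
      rw [show pvStep best kv = best from by simp [pvStep, hk]]
      rw [ih best hinv, hmk_en, hmk_es]
      simp [hken, hkes]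
    | some sp =>
      obtain ⟨s', p⟩ := sp
      by_cases hss : s' = s
      · rw [hss] at hk
        rcases hcls kv.1 p hk with ⟨hkeq, hpeq⟩ | ⟨hkeq, hpeq⟩
        · -- kv.1 = en, p = 1
          subst hpeq
          have hkes : kv.1 ≠ es := hkeq ▸ hne
          rw [hmk_en, hmk_es]
          simp only [hkeq, beq_self_eq_true, if_true, beq_iff_eq]
          rw [if_neg hne]
          cases hb : best.get? s with
          | none =>
            have hstep : pvStep best kv = best.insert s (1, kv.2) := by
              simp [pvStep, hk, PySem.Dict.contains_eq_isSome_get?, hb]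
            rw [hstep]
            have hins : (best.insert s (1, kv.2)).get? s = some (1, kv.2) :=
              PySem.Dict.get?_insert_self best s (1, kv.2)
            rw [ih _ (fun p w h => by rw [hins] at h; cases h; right; rfl)]
            rw [hins]
            cases (PySem.Dict.mk rest).get? en <;> simp
          | some pw =>
            obtain ⟨p0, w⟩ := pw
            have hcont : best.contains s = true := by
              rw [PySem.Dict.contains_eq_isSome_get?, hb]; rfl
            have hgd : best.getD s (0, "") = (p0, w) := by
              rw [PySem.Dict.getD_eq_get?_getD, hb]; rfl
            rcases hinv p0 w hb with h0 | h1
            · subst h0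
              have hstep : pvStep best kv = best.insert s (1, kv.2) := by
                simp [pvStep, hk, hcont, hgd]
              rw [hstep]
              have hins : (best.insert s (1, kv.2)).get? s = some (1, kv.2) :=
                PySem.Dict.get?_insert_self best s (1, kv.2)
              rw [ih _ (fun p w h => by rw [hins] at h; cases h; right; rfl)]
              rw [hins]
              cases (PySem.Dict.mk rest).get? en <;> simp
            · subst h1
              have hstep : pvStep best kv = best := by
                simp [pvStep, hk, hcont, hgd]
              rw [hstep, ih best hinv, hb]
              cases (PySem.Dict.mk rest).get? en <;> simp
        · -- kv.1 = es, p = 0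
          subst hpeq
          have hken : kv.1 ≠ en := hkeq ▸ (Ne.symm hne)
          rw [hmk_en, hmk_es]
          simp only [hkeq, beq_self_eq_true, if_true, beq_iff_eq]
          rw [if_neg (Ne.symm hne)]
          cases hb : best.get? s with
          | none =>
            have hstep : pvStep best kv = best.insert s (0, kv.2) := by
              simp [pvStep, hk, PySem.Dict.contains_eq_isSome_get?, hb]
            rw [hstep]
            have hins : (best.insert s (0, kv.2)).get? s = some (0, kv.2) :=
              PySem.Dict.get?_insert_self best s (0, kv.2)
            rw [ih _ (fun p w h => by rw [hins] at h; cases h; left; rfl)]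
            rw [hins]
            cases (PySem.Dict.mk rest).get? en <;> simp
          | some pw =>
            obtain ⟨p0, w⟩ := pw
            have hcont : best.contains s = true := by
              rw [PySem.Dict.contains_eq_isSome_get?, hb]; rfl
            have hgd : best.getD s (0, "") = (p0, w) := by
              rw [PySem.Dict.getD_eq_get?_getD, hb]; rfl
            have hp0 : ¬ ((0 : Int) > p0) := by
              rcases hinv p0 w hb with h | h <;> omega
            have hstep : pvStep best kv = best := by
              simp [pvStep, hk, hcont, hgd, hp0]
            rw [hstep, ih best hinv, hb]
            cases (PySem.Dict.mk rest).get? en <;> simp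
      · -- other slot: state at s unchanged
        have hken : kv.1 ≠ en := fun h => by
          rw [h, hen] at hk; exact hss (by cases hk; rfl)
        have hkes : kv.1 ≠ es := fun h => by
          rw [h, hes] at hk; exact hss (by cases hk; rfl)
        have hpres : (pvStep best kv).get? s = best.get? s := by
          simp only [pvStep, hk]
          split
          · rw [PySem.Dict.get?_insert]
            rw [if_neg (fun h => hss h.symm)]
          · rfl
        have hinv' : ∀ p w, (pvStep best kv).get? s = some (p, w) → p = 0 ∨ p = 1 := by
          rw [hpres]; exact hinv
        rw [ih _ hinv', hpres, hmk_en, hmk_es]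
        simp [hken, hkes]

-- B's scan result at one slot equals A's get-with-fallback value.
theorem pv_slot_val (s en es : String) (hne : en ≠ es)
    (hen : pvKeyIndex.get? en = some (s, 1)) (hes : pvKeyIndex.get? es = some (s, 0))
    (hcls : ∀ k p, pvKeyIndex.get? k = some (s, p) → (k = en ∧ p = 1) ∨ (k = es ∧ p = 0))
    (materia : List (String × String)) :
    (match (materia.foldl pvStep PySem.Dict.empty).get? s with
     | some pv => pv.2 | none => "") =
    (PySem.Dict.mk materia).getD en ((PySem.Dict.mk materia).getD es "") := by
  have hemp : (PySem.Dict.empty : PySem.Dict String (Int × String)).get? s = none :=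
    PySem.Dict.get?_empty s
  rw [pv_fold_get? s en es hne hen hes hcls materia PySem.Dict.empty
      (fun p w h => by rw [hemp] at h; cases h)]
  rw [hemp, PySem.Dict.getD_eq_get?_getD, PySem.Dict.getD_eq_get?_getD]
  cases (PySem.Dict.mk materia).get? en <;> cases (PySem.Dict.mk materia).get? es <;> simp

-- ===== VERDICT (by name: the statement is the Claim_ definition above) =====
set_option maxHeartbeats 1600000 in
theorem procesar_materias_py_spec : Claim_equal_procesar_materias_py := by
  intro materias_raw _
  unfold Spec_procesar_materias_py procesar_materias_py procesar_materias_py_alt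
  rw [PySem.List.foldl_append_singleton_eq_map, List.nil_append, List.map_inj_left]
  intro materia _
  unfold pvProcesarUna pvSlots
  simp only [List.map]
  refine congrArg₂ _ ?_ (congrArg₂ _ ?_ (congrArg₂ _ ?_ (congrArg₂ _ ?_ (congrArg₂ _ ?_ (congrArg₂ _ ?_ rfl)))))
  all_goals refine congrArg _ ?_
  · exact (pv_slot_val "nombre" "name" "nombre" (by decide) (by rfl) (by rfl)
      pv_hcls_nombre materia).symm
  · exact (pv_slot_val "codigo" "code" "codigo" (by decide) (by rfl) (by rfl)
      pv_hcls_codigo materia).symm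
  · exact (pv_slot_val "creditos" "credits" "creditos" (by decide) (by rfl) (by rfl)
      pv_hcls_creditos materia).symm
  · exact (pv_slot_val "estado" "status" "estado" (by decide) (by rfl) (by rfl)
      pv_hcls_estado materia).symm
  · exact (pv_slot_val "semestre" "semester" "semestre" (by decide) (by rfl) (by rfl)
      pv_hcls_semestre materia).symm
  · exact (pv_slot_val "ano" "year" "ano" (by decide) (by rfl) (by rfl)
      pv_hcls_ano materia).symm
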